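-- pv_equiv track=rewrite | github.com/pgadmin-org/pgadmin4 | web/pgadmin/browser/server_groups/servers/databases/dbms_job_scheduler/utils.py | resolve_calendar_string
-- ===== SOURCE A (Python) =====
-- MONTHS_MAPPING = dict(
--     JAN='1', FEB='2', MAR='3', APR='4', MAY='5', JUN='6',
--     JUL='7', AUG='8', SEP='9', OCT='10', NOV='11', DEC='12'
-- )
--
-- WEEKDAY_MAPPING = dict(
--     MON='1', TUE='2', WED='3', THU='4', FRI='5', SAT='6', SUN='7'
-- )
--
-- def resolve_calendar_string(calendar_string):
--     """
--     Converts calendar_string to data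
--     Args:
--         calendar_string: string to be converted
--     """
--     freq = None
--     by_date = None
--     by_month = []
--     by_monthday = []
--     by_weekday = []
--     by_hour = []
--     by_minute = []
--
--     if calendar_string is not None and len(calendar_string) > 0:
--         # First split on the basis of semicolon
--         cal_list = calendar_string.split(';')
--         for token in cal_list:
--             # Split on the basis of '=' operator as tokens are
--             # like FREQ=MONTHLY
--             if not token.strip():
--                 continue
--             [token_name, token_value] = token.split('=')
--             token_name = token_name.strip().upper()
--             token_value = token_value.strip()
--
--             if token_name == 'FREQ':
--                 freq = token_value
--             elif token_name == 'BYDATE':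
--                 by_date = token_value
--             elif token_name == 'BYMONTH':
--                 by_month = [MONTHS_MAPPING.get(v.upper(), v)
--                             for v in token_value.split(',')]
--             elif token_name == 'BYMONTHDAY':
--                 by_monthday = token_value.split(',')
--             elif token_name == 'BYDAY':
--                 by_weekday = [WEEKDAY_MAPPING.get(v.upper(), v)
--                               for v in token_value.split(',')]
--             elif token_name == 'BYHOUR':
--                 by_hour = token_value.split(',')
--             elif token_name == 'BYMINUTE':
--                 by_minute = token_value.split(',')
--
--     return freq, by_date, by_month, by_monthday, by_weekday, by_hour, by_minute
-- ===== SOURCE B (Python) =====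
-- MONTHS_MAPPING = dict(
--     JAN='1', FEB='2', MAR='3', APR='4', MAY='5', JUN='6',
--     JUL='7', AUG='8', SEP='9', OCT='10', NOV='11', DEC='12'
-- )
--
-- WEEKDAY_MAPPING = dict(
--     MON='1', TUE='2', WED='3', THU='4', FRI='5', SAT='6', SUN='7'
-- )
--
--
-- def _last(pairs, key):
--     """Value of the last pair named key, found by a backward scan; None if absent."""
--     for n, v in reversed(pairs):
--         if n == key:
--             return v
--     return None
--
--
-- def _split_field(pairs, key, mapping=None):
--     value = _last(pairs, key)
--     if value is None:
--         return []
--     parts = value.split(',')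
--     if mapping is None:
--         return parts
--     return [mapping.get(p.upper(), p) for p in parts]
--
--
-- def resolve_calendar_string(calendar_string):
--     """Tokenize into a (name, value) pair list, then compute each field by an
--     independent backward last-occurrence search."""
--     pairs = []
--     if calendar_string:
--         for token in calendar_string.split(';'):
--             if not token.strip():
--                 continue
--             [n, v] = token.split('=')
--             pairs.append((n.strip().upper(), v.strip()))
--     return (_last(pairs, 'FREQ'), _last(pairs, 'BYDATE'),
--             _split_field(pairs, 'BYMONTH', MONTHS_MAPPING),
--             _split_field(pairs, 'BYMONTHDAY'),
--             _split_field(pairs, 'BYDAY', WEEKDAY_MAPPING),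
--             _split_field(pairs, 'BYHOUR'),
--             _split_field(pairs, 'BYMINUTE'))
-- ===== Notes on version B (the rewrite author's own statement) =====
-- stated objective: alternative
-- what changed: B first tokenizes the string into a list of (name, value) pairs and then computes each of the seven result fields by an independent backward search for the last occurrence of its key, instead of A's single forward pass dispatching every token into seven accumulator variables via an if/elif chain.
import Mathlib
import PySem

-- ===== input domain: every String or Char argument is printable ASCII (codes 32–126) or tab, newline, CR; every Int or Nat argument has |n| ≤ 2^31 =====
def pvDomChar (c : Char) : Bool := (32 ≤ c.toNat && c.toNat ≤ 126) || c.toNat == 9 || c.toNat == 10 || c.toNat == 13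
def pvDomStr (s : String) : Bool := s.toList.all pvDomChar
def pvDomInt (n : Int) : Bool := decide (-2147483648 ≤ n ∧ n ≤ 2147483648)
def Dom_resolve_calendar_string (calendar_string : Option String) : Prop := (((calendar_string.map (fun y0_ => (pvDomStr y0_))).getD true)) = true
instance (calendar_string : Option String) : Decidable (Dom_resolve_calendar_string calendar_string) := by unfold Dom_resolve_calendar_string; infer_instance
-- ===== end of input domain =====

-- B tokenizes into a (name, value) pair list and computes each of the seven fields by an
-- independent backward last-occurrence search, instead of A's single forward dispatch pass;
-- objective: alternative decomposition (same cost).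

-- s.split(sep) for a non-empty literal separator (split? is 'some' there)
def pvSplit (s sep : String) : List String := (PySem.Str.split? s sep).getD []

def MONTHS_MAPPING : PySem.Dict String String := PySem.Dict.ofList
  [("JAN","1"),("FEB","2"),("MAR","3"),("APR","4"),("MAY","5"),("JUN","6"),
   ("JUL","7"),("AUG","8"),("SEP","9"),("OCT","10"),("NOV","11"),("DEC","12")]

def WEEKDAY_MAPPING : PySem.Dict String String := PySem.Dict.ofList
  [("MON","1"),("TUE","2"),("WED","3"),("THU","4"),("FRI","5"),("SAT","6"),("SUN","7")]

-- ===== PORT A =====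
abbrev PvState := Option String × Option String × List String × List String × List String × List String × List String

-- the body of A's loop: dispatch one normalized (token_name, token_value) pair
def pvDispatchA (st : PvState) (name value : String) : PvState :=
  if name = "FREQ" then (some value, st.2)
  else if name = "BYDATE" then (st.1, some value, st.2.2)
  else if name = "BYMONTH" then
    (st.1, st.2.1, (pvSplit value ",").map (fun v => MONTHS_MAPPING.getD (PySem.Str.upper v) v), st.2.2.2)
  else if name = "BYMONTHDAY" then
    (st.1, st.2.1, st.2.2.1, pvSplit value ",", st.2.2.2.2)
  else if name = "BYDAY" then
    (st.1, st.2.1, st.2.2.1, st.2.2.2.1, (pvSplit value ",").map (fun v => WEEKDAY_MAPPING.getD (PySem.Str.upper v) v), st.2.2.2.2.2)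
  else if name = "BYHOUR" then
    (st.1, st.2.1, st.2.2.1, st.2.2.2.1, st.2.2.2.2.1, pvSplit value ",", st.2.2.2.2.2.2)
  else if name = "BYMINUTE" then
    (st.1, st.2.1, st.2.2.1, st.2.2.2.1, st.2.2.2.2.1, st.2.2.2.2.2.1, pvSplit value ",")
  else st

-- one iteration of A's 'for token in cal_list' loop (ValueError on bad arity is excluded by Pre_)
def pvStepA (st : PvState) (token : String) : PvState :=
  if PySem.Str.strip token = "" then st
  else match pvSplit token "=" with
    | [tn, tv] => pvDispatchA st (PySem.Str.upper (PySem.Str.strip tn)) (PySem.Str.strip tv)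
    | _ => st

def resolve_calendar_string (calendar_string : Option String) : Option String × Option String × List String × List String × List String × List String × List String :=
  let st0 : PvState := (none, none, [], [], [], [], [])
  match calendar_string with
  | none => st0
  | some s =>
    if PySem.Str.len s > 0 then
      (pvSplit s ";").foldl pvStepA st0
    else st0

-- ===== PORT B =====
-- B's '_last': first match of a backward scan over the pair list
def pvLast (pairs : List (String × String)) (key : String) : Option String :=
  (List.find? (fun p => p.1 == key) pairs.reverse).map Prod.snd

-- B's '_split_field' without a mapping
def pvFieldPlain (pairs : List (String × String)) (key : String) : List String :=
  match pvLast pairs key with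
  | none => []
  | some v => pvSplit v ","

-- B's '_split_field' with a mapping
def pvFieldMapped (pairs : List (String × String)) (key : String) (m : PySem.Dict String String) : List String :=
  match pvLast pairs key with
  | none => []
  | some v => (pvSplit v ",").map (fun x => m.getD (PySem.Str.upper x) x)

-- one iteration of B's tokenizing loop: append the normalized pair
def pvStepB (acc : List (String × String)) (token : String) : List (String × String) :=
  if PySem.Str.strip token = "" then acc
  else match pvSplit token "=" with
    | [tn, tv] => acc ++ [(PySem.Str.upper (PySem.Str.strip tn), PySem.Str.strip tv)]
    | _ => acc

def resolve_calendar_string_alt (calendar_string : Option String) : Option String × Option String × List String × List String × List String × List String × List String :=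
  let pairs : List (String × String) :=
    match calendar_string with
    | none => []
    | some s =>
      if PySem.Str.len s > 0 then
        (pvSplit s ";").foldl pvStepB []
      else []
  (pvLast pairs "FREQ", pvLast pairs "BYDATE",
   pvFieldMapped pairs "BYMONTH" MONTHS_MAPPING, pvFieldPlain pairs "BYMONTHDAY",
   pvFieldMapped pairs "BYDAY" WEEKDAY_MAPPING, pvFieldPlain pairs "BYHOUR",
   pvFieldPlain pairs "BYMINUTE")

-- ===== PRECONDITION & SPEC =====
-- Pre_ excludes exactly the inputs on which A raises ValueError: a non-blank
-- semicolon-separated token whose split on the equals sign does not have exactly two parts.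
def Pre_resolve_calendar_string (calendar_string : Option String) : Prop :=
  ∀ t ∈ pvSplit (calendar_string.getD "") ";",
    PySem.Str.strip t = "" ∨ (pvSplit t "=").length = 2
instance (calendar_string : Option String) : Decidable (Pre_resolve_calendar_string calendar_string) := by unfold Pre_resolve_calendar_string; infer_instance

def pvWitness_resolve_calendar_string : Option String := some "FREQ=DAILY; byday = mon,FRI ;;BYHOUR=1,2"

def Spec_resolve_calendar_string (calendar_string : Option String) (out : Option String × Option String × List String × List String × List String × List String × List String) : Prop := out = resolve_calendar_string_alt calendar_string
instance (calendar_string : Option String) (out : Option String × Option String × List String × List String × List String × List String × List String) : Decidable (Spec_resolve_calendar_string calendar_string out) := by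
  unfold Spec_resolve_calendar_string
  haveI h4 : DecidableEq (List String × List String × List String × List String) := inferInstance
  haveI h5 : DecidableEq (List String × List String × List String × List String × List String) := inferInstance
  haveI h6 : DecidableEq (Option String × List String × List String × List String × List String × List String) := inferInstance
  haveI h7 : DecidableEq (Option String × Option String × List String × List String × List String × List String × List String) := inferInstance
  infer_instance

-- ===== CLAIM (what is proved, stated in full; the proofs are below) =====
def Claim_equal_resolve_calendar_string : Prop := ∀ (calendar_string : Option String), Dom_resolve_calendar_string calendar_string → Pre_resolve_calendar_string calendar_string → Spec_resolve_calendar_string calendar_string (resolve_calendar_string calendar_string)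

-- ===== LEMMAS AND PROOFS =====

-- B's read-out of a pair list, with an explicit default state
def pvExtract (pairs : List (String × String)) (st : PvState) : PvState :=
  ((pvLast pairs "FREQ").elim st.1 some, (pvLast pairs "BYDATE").elim st.2.1 some,
   (pvLast pairs "BYMONTH").elim st.2.2.1 (fun v => (pvSplit v ",").map (fun x => MONTHS_MAPPING.getD (PySem.Str.upper x) x)),
   (pvLast pairs "BYMONTHDAY").elim st.2.2.2.1 (fun v => pvSplit v ","),
   (pvLast pairs "BYDAY").elim st.2.2.2.2.1 (fun v => (pvSplit v ",").map (fun x => WEEKDAY_MAPPING.getD (PySem.Str.upper x) x)),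
   (pvLast pairs "BYHOUR").elim st.2.2.2.2.2.1 (fun v => pvSplit v ","),
   (pvLast pairs "BYMINUTE").elim st.2.2.2.2.2.2 (fun v => pvSplit v ","))

lemma pvElim_none_some {α : Type} (o : Option α) : o.elim none some = o := by
  cases o <;> rfl

lemma pvElim_app {α β : Type} (o : Option α) (f : α → β) (v : α) :
    o.elim (f v) f = f (o.getD v) := by
  cases o <;> rfl

lemma pvLast_cons (n v : String) (ps : List (String × String)) (k : String) :
    pvLast ((n, v) :: ps) k = (pvLast ps k).elim (if n = k then some v else none) some := by
  unfold pvLast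
  rw [List.reverse_cons, List.find?_append]
  cases hf : List.find? (fun p => p.1 == k) ps.reverse with
  | none =>
    simp only [List.find?]
    cases hnk : n == k <;> simp_all
  | some p => simp

-- dispatching one pair equals prepending it to the pair list before read-out
lemma pvDispatch_extract (ps : List (String × String)) (st : PvState) (n v : String) :
    pvExtract ps (pvDispatchA st n v) = pvExtract ((n, v) :: ps) st := by
  by_cases h1 : n = "FREQ"
  · subst h1; simp [pvExtract, pvDispatchA, pvLast_cons, pvElim_none_some, pvElim_app]
  by_cases h2 : n = "BYDATE"
  · subst h2; simp [pvExtract, pvDispatchA, pvLast_cons, pvElim_none_some, pvElim_app]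
  by_cases h3 : n = "BYMONTH"
  · subst h3; simp [pvExtract, pvDispatchA, pvLast_cons, pvElim_none_some, pvElim_app]
    cases pvLast ps "BYMONTH" <;> rfl
  by_cases h4 : n = "BYMONTHDAY"
  · subst h4; simp [pvExtract, pvDispatchA, pvLast_cons, pvElim_none_some, pvElim_app]
    cases pvLast ps "BYMONTHDAY" <;> rfl
  by_cases h5 : n = "BYDAY"
  · subst h5; simp [pvExtract, pvDispatchA, pvLast_cons, pvElim_none_some, pvElim_app]
    cases pvLast ps "BYDAY" <;> rfl
  by_cases h6 : n = "BYHOUR"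
  · subst h6; simp [pvExtract, pvDispatchA, pvLast_cons, pvElim_none_some, pvElim_app]
    cases pvLast ps "BYHOUR" <;> rfl
  by_cases h7 : n = "BYMINUTE"
  · subst h7; simp [pvExtract, pvDispatchA, pvLast_cons, pvElim_none_some, pvElim_app]
    cases pvLast ps "BYMINUTE" <;> rfl
  simp [pvExtract, pvDispatchA, pvLast_cons, pvElim_none_some, h1, h2, h3, h4, h5, h6, h7]

-- the tokenizing fold appends to its accumulator
lemma pvFoldB_append (toks : List String) (acc : List (String × String)) :
    toks.foldl pvStepB acc = acc ++ toks.foldl pvStepB [] := by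
  induction toks generalizing acc with
  | nil => simp
  | cons t ts ih =>
    simp only [List.foldl_cons]
    rw [ih (pvStepB acc t), ih (pvStepB [] t)]
    have hstep : pvStepB acc t = acc ++ pvStepB [] t := by
      unfold pvStepB
      by_cases hb : PySem.Str.strip t = ""
      · simp [hb]
      · rw [if_neg hb, if_neg hb]
        rcases pvSplit t "=" with _ | ⟨a, _ | ⟨b, _ | ⟨c, r⟩⟩⟩ <;> simp
    rw [hstep, List.append_assoc]

-- A's fold over good tokens equals B's tokenize-then-read-out
lemma pvFold_extract (toks : List String) (st : PvState)
    (h : ∀ t ∈ toks, PySem.Str.strip t = "" ∨ (pvSplit t "=").length = 2) :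
    toks.foldl pvStepA st = pvExtract (toks.foldl pvStepB []) st := by
  induction toks generalizing st with
  | nil => cases st; rfl
  | cons t ts ih =>
    simp only [List.foldl_cons]
    rw [ih (pvStepA st t) (fun x hx => h x (List.mem_cons_of_mem _ hx)),
        pvFoldB_append ts (pvStepB [] t)]
    by_cases hb : PySem.Str.strip t = ""
    · rw [show pvStepA st t = st by simp [pvStepA, hb],
          show pvStepB [] t = [] by simp [pvStepB, hb]]
      rw [List.nil_append]
    · have h2 : (pvSplit t "=").length = 2 :=
        (h t (List.mem_cons_self)).resolve_left hb
      rcases hl : pvSplit t "=" with _ | ⟨a, _ | ⟨b, _ | ⟨c, r⟩⟩⟩ <;>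
        simp only [hl, List.length_nil, List.length_cons] at h2
      · omega
      · omega
      · rw [show pvStepA st t = pvDispatchA st (PySem.Str.upper (PySem.Str.strip a)) (PySem.Str.strip b) by
              simp [pvStepA, hb, hl],
            show pvStepB [] t = [(PySem.Str.upper (PySem.Str.strip a), PySem.Str.strip b)] by
              simp [pvStepB, hb, hl],
            List.singleton_append]
        exact pvDispatch_extract _ st _ _
      · omega

lemma pvExtract_init (ps : List (String × String)) :
    pvExtract ps ((none, none, [], [], [], [], []) : PvState) =
      (pvLast ps "FREQ", pvLast ps "BYDATE",
       pvFieldMapped ps "BYMONTH" MONTHS_MAPPING, pvFieldPlain ps "BYMONTHDAY",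
       pvFieldMapped ps "BYDAY" WEEKDAY_MAPPING, pvFieldPlain ps "BYHOUR",
       pvFieldPlain ps "BYMINUTE") := by
  unfold pvExtract pvFieldPlain pvFieldMapped
  simp only [Prod.mk.injEq]
  refine ⟨?_, ?_, ?_, ?_, ?_, ?_, ?_⟩ <;>
    (first
      | (cases pvLast ps "FREQ" <;> rfl)
      | (cases pvLast ps "BYDATE" <;> rfl)
      | (cases pvLast ps "BYMONTH" <;> rfl)
      | (cases pvLast ps "BYMONTHDAY" <;> rfl)
      | (cases pvLast ps "BYDAY" <;> rfl)
      | (cases pvLast ps "BYHOUR" <;> rfl)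
      | (cases pvLast ps "BYMINUTE" <;> rfl))

-- ===== VERDICT (by name: the statement is the Claim_ definition above) =====
theorem resolve_calendar_string_spec : Claim_equal_resolve_calendar_string := by
  intro cs _ hpre
  unfold Spec_resolve_calendar_string resolve_calendar_string resolve_calendar_string_alt
  match cs with
  | none => rfl
  | some s =>
    by_cases hlen : PySem.Str.len s > 0
    · simp only [hlen, if_pos]
      rw [pvFold_extract (pvSplit s ";") _ hpre, pvExtract_init]
    · simp only [hlen, if_false]
      rfl
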